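-- pv_equiv track=rewrite | github.com/daengdaengLee/baekjoon_coding | 2447/2447.py | make_next_str
-- ===== SOURCE A (Python) =====
-- def make_next_str(str):
--   strs = str.split("\n")
--
--   first_line = []
--   for line in strs:
--     first_line.append(line * 3)
--   first_line = "\n".join(first_line)
--
--   second_line = []
--   for line in strs:
--     new_line = line
--     new_line += " " * len(line)
--     new_line += line
--     second_line.append(new_line)
--   second_line = "\n".join(second_line)
--
--   third_line = []
--   for line in strs:
--     third_line.append(line * 3)
--   third_line = "\n".join(third_line)
--
--   return "\n".join([first_line, second_line, third_line])
-- ===== SOURCE B (Python) =====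
-- def make_next_str(str):
--   mask = ["***", "* *", "***"]
--   lines = str.split("\n")
--   out = []
--   for row in mask:
--     for line in lines:
--       out.append("".join(line if c == "*" else " " * len(line) for c in row))
--   return "\n".join(out)
-- ===== Notes on version B (the rewrite author's own statement) =====
-- stated objective: idiomatic
-- what changed: Replaces the three separate per-block loops and the final join-of-joined-blocks with a single flat pass driven by an explicit 3x3 star mask, producing all 3N output lines directly.
import Mathlib
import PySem

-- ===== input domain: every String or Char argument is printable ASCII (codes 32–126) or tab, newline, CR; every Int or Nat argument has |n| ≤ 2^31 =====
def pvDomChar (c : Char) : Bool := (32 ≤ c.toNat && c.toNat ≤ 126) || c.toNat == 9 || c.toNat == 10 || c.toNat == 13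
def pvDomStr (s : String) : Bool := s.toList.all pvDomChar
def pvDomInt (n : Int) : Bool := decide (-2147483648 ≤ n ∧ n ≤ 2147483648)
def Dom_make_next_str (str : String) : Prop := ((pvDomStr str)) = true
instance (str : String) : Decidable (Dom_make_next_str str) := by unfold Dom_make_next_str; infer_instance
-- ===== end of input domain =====

-- B builds all 3N lines in one flat pass driven by an explicit 3x3 star mask instead of
-- A's three separate per-block loops joined afterwards (objective: idiomatic; same cost).

-- ===== PORT A =====
-- literal port of A, working over List Char (Lean's String.append is kernel-opaque)
def make_next_str (str : String) : String :=
  let strs := PySem.Chars.splitOn str.toList ['\n']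
  let first_line := strs.foldl (fun acc line => acc ++ [line ++ line ++ line]) []
  let first := PySem.Chars.join ['\n'] first_line
  let second_line := strs.foldl
    (fun acc line => acc ++ [line ++ List.replicate line.length ' ' ++ line]) []
  let second := PySem.Chars.join ['\n'] second_line
  let third_line := strs.foldl (fun acc line => acc ++ [line ++ line ++ line]) []
  let third := PySem.Chars.join ['\n'] third_line
  String.ofList (PySem.Chars.join ['\n'] [first, second, third])

-- ===== PORT B =====
def make_next_str_alt (str : String) : String :=
  let mask : List (List Char) := [['*','*','*'], ['*',' ','*'], ['*','*','*']]
  let lines := PySem.Chars.splitOn str.toList ['\n']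
  let out := mask.foldl
    (fun acc row =>
      acc ++ lines.map (fun line => PySem.Chars.join []
        (row.map (fun c => if c = '*' then line else List.replicate line.length ' ')))) []
  String.ofList (PySem.Chars.join ['\n'] out)

-- ===== PRECONDITION & SPEC =====
def Spec_make_next_str (str : String) (out : String) : Prop := out = make_next_str_alt str
instance (str : String) (out : String) : Decidable (Spec_make_next_str str out) := by unfold Spec_make_next_str; infer_instance

-- ===== CLAIM (what is proved, stated in full; the proofs are below) =====
def Claim_equal_make_next_str : Prop := ∀ (str : String), Dom_make_next_str str → Spec_make_next_str str (make_next_str str)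

-- ===== LEMMAS AND PROOFS =====

theorem pv_foldl_append_singleton {α β : Type} (f : α → β) (l : List α) (a : List β) :
    l.foldl (fun acc x => acc ++ [f x]) a = a ++ l.map f := by
  induction l generalizing a with
  | nil => simp
  | cons x t ih => simp [List.foldl, ih]

theorem pv_splitOn_go_ne_nil (sep : List Char) (fuel : Nat) (l cur : List Char)
    (acc : List (List Char)) : PySem.Chars.splitOn.go sep fuel l cur acc ≠ [] := by
  induction fuel generalizing l cur acc with
  | zero => simp [PySem.Chars.splitOn.go]
  | succ n ih =>
    cases l with
    | nil => simp [PySem.Chars.splitOn.go]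
    | cons c rest =>
      rw [PySem.Chars.splitOn.go]
      split
      · exact ih _ _ _
      · exact ih _ _ _

theorem pv_splitOn_ne_nil (s sep : List Char) : PySem.Chars.splitOn s sep ≠ [] :=
  pv_splitOn_go_ne_nil sep _ s [] []

theorem pv_join_append (sep : List Char) (xs ys : List (List Char))
    (hx : xs ≠ []) (hy : ys ≠ []) :
    PySem.Chars.join sep (xs ++ ys) =
      PySem.Chars.join sep xs ++ sep ++ PySem.Chars.join sep ys := by
  induction xs with
  | nil => exact absurd rfl hx
  | cons a t ih =>
    cases t with
    | nil =>
      cases ys with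
      | nil => exact absurd rfl hy
      | cons b u =>
        rw [List.singleton_append, PySem.Chars.join_cons_cons, PySem.Chars.join_singleton]
    | cons b u =>
      rw [List.cons_append, List.cons_append, PySem.Chars.join_cons_cons,
        show (b :: (u ++ ys)) = ((b :: u) ++ ys) from rfl, ih (by simp),
        PySem.Chars.join_cons_cons]
      simp [List.append_assoc]

theorem pv_blocks (sep : List Char) (strs : List (List Char)) (h : strs ≠ [])
    (f g : List Char → List Char) :
    PySem.Chars.join sep
        [PySem.Chars.join sep (strs.map f), PySem.Chars.join sep (strs.map g),
          PySem.Chars.join sep (strs.map f)] =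
      PySem.Chars.join sep (strs.map f ++ (strs.map g ++ strs.map f)) := by
  have hmap : ∀ (k : List Char → List Char), strs.map k ≠ [] := by
    intro k hk; exact h (List.map_eq_nil_iff.mp hk)
  rw [pv_join_append sep _ _ (hmap f) (by simp [hmap]),
      pv_join_append sep _ _ (hmap g) (hmap f)]
  simp [PySem.Chars.join_cons_cons, PySem.Chars.join_singleton, List.append_assoc]

-- ===== VERDICT (by name: the statement is the Claim_ definition above) =====
theorem make_next_str_spec : Claim_equal_make_next_str := by
  intro str _
  unfold Spec_make_next_str make_next_str make_next_str_alt
  simp only [pv_foldl_append_singleton, List.foldl_cons, List.foldl_nil, List.map_cons,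
    List.map_nil, List.nil_append, List.append_assoc]
  rw [← pv_blocks ['\n'] _ (pv_splitOn_ne_nil _ _)]
  simp [PySem.Chars.join_cons_cons, PySem.Chars.join_singleton, List.append_assoc]
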